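-- pv_equiv track=rewrite | github.com/thru-goes-hamilton/Guitabify | backend/functions.py | midi_pitch_to_guitar_tab
-- ===== SOURCE A (Python) =====
-- def midi_pitch_to_guitar_tab(pitch):
--     # Standard guitar tuning (from low to high)
--     guitar_tuning = [40, 45, 50, 55, 59, 64]  # E2, A2, D3, G3, B3, E4
--
--
--     best_string = 0
--     best_fret = float('inf')
--
--     for string, open_pitch in enumerate(guitar_tuning):
--         if pitch >= open_pitch:
--             fret = pitch - open_pitch
--             if fret < best_fret:
--                 best_string = string
--                 best_fret = fret
--
--     return 6-best_string, best_fret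
-- ===== SOURCE B (Python) =====
-- def midi_pitch_to_guitar_tab(pitch):
--     # Tuning is strictly ascending, so the minimal fret comes from the
--     # highest open pitch <= pitch: scan from the highest string down and
--     # return on the first match.
--     guitar_tuning = [40, 45, 50, 55, 59, 64]
--     for string, open_pitch in reversed(list(enumerate(guitar_tuning))):
--         if pitch >= open_pitch:
--             return 6 - string, pitch - open_pitch
--     return 6, float('inf')
-- ===== Notes on version B (the rewrite author's own statement) =====
-- stated objective: simpler
-- what changed: Replaces the full scan tracking best_string/best_fret with an early-returning reverse scan that exploits the strictly ascending tuning: the first string (from the top) whose open pitch is <= pitch gives the minimal fret.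
-- outside the precondition, e.g. on midi_pitch_to_guitar_tab(39): A returns (6, inf), B returns (6, inf)
import Mathlib
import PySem

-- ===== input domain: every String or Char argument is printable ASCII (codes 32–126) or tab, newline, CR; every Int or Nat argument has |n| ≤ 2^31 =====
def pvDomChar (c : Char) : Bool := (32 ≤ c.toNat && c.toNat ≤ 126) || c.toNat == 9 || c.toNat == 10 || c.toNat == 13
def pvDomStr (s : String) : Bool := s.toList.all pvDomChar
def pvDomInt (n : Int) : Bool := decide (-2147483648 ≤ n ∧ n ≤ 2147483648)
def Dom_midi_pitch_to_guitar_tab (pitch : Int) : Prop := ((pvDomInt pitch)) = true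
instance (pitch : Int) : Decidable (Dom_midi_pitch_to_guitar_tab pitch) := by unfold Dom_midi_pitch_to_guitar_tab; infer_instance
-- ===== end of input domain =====

-- B replaces A's best-tracking full scan by an early-returning reverse scan (objective: simpler).

-- ===== PORT A =====
-- best_fret starts as float('inf'); modelled as Option Int with none = inf
-- (the final .getD 0 is reached only when pitch < 40, outside Pre_, where the
-- Python value is the float inf and not an Int).
def midi_pitch_to_guitar_tab (pitch : Int) : Int × Int :=
  let guitar_tuning : List Int := [40, 45, 50, 55, 59, 64]
  let st := (PySem.List.enumerate guitar_tuning).foldl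
    (fun (st : Int × Option Int) (p : Int × Int) =>
      if pitch ≥ p.2 then
        let fret := pitch - p.2
        if (match st.2 with | none => true | some b => decide (fret < b)) then
          (p.1, some fret)
        else st
      else st)
    (0, none)
  (6 - st.1, st.2.getD 0)

-- ===== PORT B =====
-- reversed(list(enumerate(guitar_tuning))): early-return scan; [] case is the
-- Python fallthrough (6, float('inf')), unreachable under Pre_ (0 stands in for inf).
def midiAltGo (pitch : Int) : List (Int × Int) → Int × Int
  | [] => (6, 0)
  | (string, open_pitch) :: rest =>
    if pitch ≥ open_pitch then (6 - string, pitch - open_pitch)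
    else midiAltGo pitch rest

def midi_pitch_to_guitar_tab_alt (pitch : Int) : Int × Int :=
  midiAltGo pitch [(5, 64), (4, 59), (3, 55), (2, 50), (1, 45), (0, 40)]

-- ===== PRECONDITION & SPEC =====
-- Pre_ excludes pitch < 40: there A returns (6, float('inf')), a float, not a value
-- of the declared int pair type (B returns the same non-int value there).
def Pre_midi_pitch_to_guitar_tab (pitch : Int) : Prop := 40 ≤ pitch
instance (pitch : Int) : Decidable (Pre_midi_pitch_to_guitar_tab pitch) := by unfold Pre_midi_pitch_to_guitar_tab; infer_instance
def pvWitness_midi_pitch_to_guitar_tab : Int := 57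

def Spec_midi_pitch_to_guitar_tab (pitch : Int) (out : Int × Int) : Prop := out = midi_pitch_to_guitar_tab_alt pitch
instance (pitch : Int) (out : Int × Int) : Decidable (Spec_midi_pitch_to_guitar_tab pitch out) := by unfold Spec_midi_pitch_to_guitar_tab; infer_instance

-- ===== CLAIM =====
def Claim_equal_midi_pitch_to_guitar_tab : Prop := ∀ (pitch : Int), Dom_midi_pitch_to_guitar_tab pitch → Pre_midi_pitch_to_guitar_tab pitch → Spec_midi_pitch_to_guitar_tab pitch (midi_pitch_to_guitar_tab pitch)

-- ===== LEMMAS AND PROOFS =====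

-- ===== VERDICT =====
set_option maxHeartbeats 1000000 in
theorem midi_pitch_to_guitar_tab_spec : Claim_equal_midi_pitch_to_guitar_tab := by
  intro pitch _ hp
  unfold Spec_midi_pitch_to_guitar_tab midi_pitch_to_guitar_tab midi_pitch_to_guitar_tab_alt midiAltGo
  unfold Pre_midi_pitch_to_guitar_tab at hp
  simp only [PySem.List.enumerate_cons, PySem.List.enumerate_nil, List.foldl, ge_iff_le]
  have f40_45 : pitch - 45 < pitch - 40 := by omega
  have f40_50 : pitch - 50 < pitch - 40 := by omega
  have f45_50 : pitch - 50 < pitch - 45 := by omega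
  have f40_55 : pitch - 55 < pitch - 40 := by omega
  have f45_55 : pitch - 55 < pitch - 45 := by omega
  have f50_55 : pitch - 55 < pitch - 50 := by omega
  have f40_59 : pitch - 59 < pitch - 40 := by omega
  have f45_59 : pitch - 59 < pitch - 45 := by omega
  have f50_59 : pitch - 59 < pitch - 50 := by omega
  have f55_59 : pitch - 59 < pitch - 55 := by omega
  have f40_64 : pitch - 64 < pitch - 40 := by omega
  have f45_64 : pitch - 64 < pitch - 45 := by omega
  have f50_64 : pitch - 64 < pitch - 50 := by omega
  have f55_64 : pitch - 64 < pitch - 55 := by omega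
  have f59_64 : pitch - 64 < pitch - 59 := by omega
  by_cases h45 : 45 ≤ pitch <;> by_cases h50 : 50 ≤ pitch <;> by_cases h55 : 55 ≤ pitch <;>
    by_cases h59 : 59 ≤ pitch <;> by_cases h64 : 64 ≤ pitch <;>
    first
      | (exfalso; omega)
      | simp [midiAltGo, *]
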